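-- pv_equiv track=rewrite | github.com/dododoyo/Competitive-Programming | 0000CodeForces/contests/Contest-05/B_Divisibility_by_2_n.py | make_divisible
-- ===== SOURCE A (Python) =====
-- def powersOf2(x):
--     #function to get each 2powers
--     p = 0
--     while x % 2 == 0:x //= 2;p += 1
--     return p
--
-- def make_divisible(n,a):
--     totalPower = 0
--     for j in a:
--         totalPower += powersOf2(j)
--     b = [0]*(n//2);m=0
--     #get valid indeces from all indeces
--     #with their power
--     for i in range(2,n+1,2):
--         b[m]=powersOf2(i);m+=1
--
--     #sort it in reverse to start from the maximum
--     b.sort(reverse=True)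
--     solution = 0
--
--     for l in b:
--         if totalPower >= n:break
--         totalPower += l;solution += 1
--     return (solution if totalPower >= n else -1)
-- ===== SOURCE B (Python) =====
-- def make_divisible(n, a):
--     # Bucket the even numbers 2..n by 2-adic valuation v: there are
--     # n//2**v - n//2**(v+1) of them with valuation exactly v.  Consume the
--     # buckets greedily from the highest valuation down, taking a whole bucket
--     # (or a ceil-division slice of it) at a time instead of sorting and
--     # scanning item by item.
--     def v2(x):
--         p = 0
--         while x % 2 == 0:
--             x //= 2
--             p += 1
--         return p
--
--     deficit = n - sum(v2(j) for j in a)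
--     if deficit <= 0:
--         return 0
--     v = 0
--     while (1 << (v + 1)) <= n:
--         v += 1
--     sol = 0
--     while v >= 1:
--         cnt = n // (1 << v) - n // (1 << (v + 1))
--         if deficit > v * cnt:
--             deficit -= v * cnt
--             sol += cnt
--         else:
--             return sol + (deficit + v - 1) // v
--         v -= 1
--     return -1
-- ===== Notes on version B (the rewrite author's own statement) =====
-- stated objective: faster
-- what changed: Instead of materialising the 2-adic valuation of every even number up to n, sorting them descending and consuming them one by one, B counts how many evens have each valuation v in closed form (n//2^v - n//2^(v+1)) and consumes whole buckets from the highest valuation down with a ceiling division, so nothing of size n is ever built.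
import Mathlib
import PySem

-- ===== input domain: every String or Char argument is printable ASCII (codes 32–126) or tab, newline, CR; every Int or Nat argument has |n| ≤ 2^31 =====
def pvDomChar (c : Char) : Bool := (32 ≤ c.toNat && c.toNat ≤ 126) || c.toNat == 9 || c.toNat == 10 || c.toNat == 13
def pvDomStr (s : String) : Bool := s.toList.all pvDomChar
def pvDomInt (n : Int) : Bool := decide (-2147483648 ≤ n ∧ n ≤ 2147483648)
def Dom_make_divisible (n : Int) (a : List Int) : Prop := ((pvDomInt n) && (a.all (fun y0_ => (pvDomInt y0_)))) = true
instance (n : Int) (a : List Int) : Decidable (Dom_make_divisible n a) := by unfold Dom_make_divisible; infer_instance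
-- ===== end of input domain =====

-- B buckets the even numbers 2..n by 2-adic valuation via floor(n/2^v) counts and
-- consumes the buckets greedily high-to-low in closed form, instead of A's
-- materialise-all-valuations-then-sort-then-scan.

-- ===== PORT A =====
-- while x % 2 == 0: x //= 2; p += 1   (powersOf2(0) loops forever in Python;
-- the 'x = 0' guard below only makes the port total)
def powersOf2 (x : Int) : Int :=
  if _h : x = 0 then 0
  else if PySem.Int.mod x 2 = 0 then powersOf2 (PySem.Int.floordiv x 2) + 1 else 0
termination_by x.natAbs
decreasing_by
  rename_i hm
  rw [PySem.Int.mod_eq_zero_iff_dvd] at hm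
  rw [PySem.Int.floordiv_eq_ediv_of_pos (by omega : (0:Int) < 2)]
  omega

-- for i in range(2, n+1, 2): b[m] = powersOf2(i); m += 1
-- (the Python list b is a dynamic array: ported as Array Int; m is Python's
-- nonnegative index counter, kept as Nat; b[m] is in range by construction)
-- for l in b: if totalPower >= n: break; totalPower += l; solution += 1
def fillLoop (b : Array Int) (m : Nat) : List Int → Array Int × Nat
  | [] => (b, m)
  | i :: rest => fillLoop (b.setIfInBounds m (powersOf2 i)) (m + 1) rest

def greedyA (n : Int) : List Int → Int → Int → Int × Int
  | [], tp, sol => (tp, sol)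
  | l :: rest, tp, sol =>
      if n ≤ tp then (tp, sol) else greedyA n rest (tp + l) (sol + 1)

def make_divisible (n : Int) (a : List Int) : Int :=
  let totalPower := a.foldl (fun s j => s + powersOf2 j) 0
  let b0 : Array Int := Array.replicate (PySem.Int.floordiv n 2).toNat 0
  let filled := fillLoop b0 0 (PySem.List.pyRange 2 (n + 1) 2)
  -- b.sort(reverse=True): Python's stable sort, ported as the stable library
  -- merge sort with the reversed order
  let bs := filled.1.toList.mergeSort (fun a b : Int => decide (b ≤ a))
  let r := greedyA n bs totalPower 0
  if n ≤ r.1 then r.2 else -1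

-- ===== PORT B =====
-- Source B's helper v2: the same while loop as A's powersOf2, with the same totality guard at 0
def v2 (x : Int) : Int :=
  if _h : x = 0 then 0
  else if PySem.Int.mod x 2 = 0 then v2 (PySem.Int.floordiv x 2) + 1 else 0
termination_by x.natAbs
decreasing_by
  rename_i hm
  rw [PySem.Int.mod_eq_zero_iff_dvd] at hm
  rw [PySem.Int.floordiv_eq_ediv_of_pos (by omega : (0:Int) < 2)]
  omega

-- while (1 << (v+1)) <= n: v += 1   (v stays ≥ 0, kept as Nat; 1 << k = 2^k for k ≥ 0)
def findV (n : Int) (v : Nat) : Nat :=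
  if 2 ^ (v + 1) ≤ n then findV n (v + 1) else v
termination_by n.toNat + 1 - v
decreasing_by
  rename_i h
  have h2 : (v + 1 : Nat) < 2 ^ (v + 1) := Nat.lt_two_pow_self
  have h3 : ((2 : Int) ^ (v + 1)) = ((2 ^ (v + 1) : Nat) : Int) := by push_cast; ring
  omega

-- while v >= 1: cnt = n//(1<<v) - n//(1<<(v+1)); if deficit > v*cnt: … else: return …
def bucketLoop (n : Int) : Nat → Int → Int → Int
  | 0, _, _ => -1
  | v + 1, deficit, sol =>
      let w : Int := ((v + 1 : Nat) : Int)
      let cnt := PySem.Int.floordiv n (2 ^ (v + 1)) - PySem.Int.floordiv n (2 ^ (v + 2))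
      if w * cnt < deficit then bucketLoop n v (deficit - w * cnt) (sol + cnt)
      else sol + PySem.Int.floordiv (deficit + w - 1) w

def make_divisible_alt (n : Int) (a : List Int) : Int :=
  let total := a.foldl (fun s j => s + v2 j) 0
  let deficit := n - total
  if deficit ≤ 0 then 0
  else bucketLoop n (findV n 0) deficit 0

-- ===== PRECONDITION & SPEC =====
-- No Pre_: on inputs with 0 ∈ a Python's powersOf2(0) loops forever (A and B alike,
-- so neither returns); everywhere else A returns normally, and both ports (whose
-- 'x = 0' guard only serves totality) agree on all inputs.
def Spec_make_divisible (n : Int) (a : List Int) (out : Int) : Prop := out = make_divisible_alt n a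
instance (n : Int) (a : List Int) (out : Int) : Decidable (Spec_make_divisible n a out) := by unfold Spec_make_divisible; infer_instance

-- ===== CLAIM (what is proved, stated in full; the proofs are below) =====
def Claim_equal_make_divisible : Prop := ∀ (n : Int) (a : List Int), Dom_make_divisible n a → Spec_make_divisible n a (make_divisible n a)

-- ===== LEMMAS AND PROOFS =====

theorem v2_eq_powersOf2 (x : Int) : v2 x = powersOf2 x := by
  induction x using v2.induct with
  | case1 => rw [v2, powersOf2]; norm_num
  | case2 x h hm ih => rw [v2, powersOf2, dif_neg h, dif_neg h, if_pos hm, if_pos hm, ih]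
  | case3 x h hm => rw [v2, powersOf2, dif_neg h, dif_neg h, if_neg hm, if_neg hm]

theorem powersOf2_nonneg (x : Int) : 0 ≤ powersOf2 x := by
  induction x using powersOf2.induct with
  | case1 => rw [powersOf2]; norm_num
  | case2 x h hm ih => rw [powersOf2, dif_neg h, if_pos hm]; omega
  | case3 x h hm => rw [powersOf2, dif_neg h, if_neg hm]

theorem powersOf2_spec (x : Int) (hx : x ≠ 0) :
    (2:Int) ^ (powersOf2 x).toNat ∣ x ∧ ¬ (2:Int) ^ ((powersOf2 x).toNat + 1) ∣ x := by
  induction x using powersOf2.induct with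
  | case1 => exact absurd rfl hx
  | case2 x h hm ih =>
    have hdvd : (2:Int) ∣ x := (PySem.Int.mod_eq_zero_iff_dvd x 2).mp hm
    have hfd : PySem.Int.floordiv x 2 = x / 2 :=
      PySem.Int.floordiv_eq_ediv_of_pos (by omega : (0:Int) < 2)
    have hx2 : x / 2 ≠ 0 := by omega
    obtain ⟨h1, h2⟩ := by rw [hfd] at ih; exact ih hx2
    rw [powersOf2, dif_neg h, if_pos hm, hfd]
    have hp : (powersOf2 (x / 2) + 1).toNat = (powersOf2 (x/2)).toNat + 1 := by
      have := powersOf2_nonneg (x/2); omega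
    rw [hp]
    have hx2eq : 2 * (x / 2) = x := by omega
    set p := (powersOf2 (x / 2)).toNat with hpdef
    constructor
    · obtain ⟨c, hcc⟩ := h1
      refine ⟨c, ?_⟩
      calc x = 2 * (x / 2) := hx2eq.symm
        _ = 2 * (2 ^ p * c) := by rw [hcc]
        _ = 2 ^ (p + 1) * c := by ring
    · intro hc
      apply h2
      obtain ⟨c, hc⟩ := hc
      refine ⟨c, ?_⟩
      have hx' : x = 2 * (2 ^ (p + 1) * c) := by
        rw [hc]; ring
      omega
  | case3 x h hm =>
    rw [PySem.Int.mod_eq_zero_iff_dvd] at hm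
    rw [powersOf2, dif_neg h, if_neg (by rwa [PySem.Int.mod_eq_zero_iff_dvd])]
    norm_num
    omega

-- uniqueness of the 2-adic valuation
theorem pow_two_val_unique (x : Int) (v w : Nat)
    (hv : (2:Int) ^ v ∣ x ∧ ¬ (2:Int) ^ (v+1) ∣ x)
    (hw : (2:Int) ^ w ∣ x ∧ ¬ (2:Int) ^ (w+1) ∣ x) : v = w := by
  by_contra hne
  rcases Nat.lt_or_ge v w with h | h
  · exact hv.2 (dvd_trans (pow_dvd_pow 2 (by omega)) hw.1)
  · have : v = w ∨ w < v := by omega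
    rcases this with h' | h'
    · exact hne h'
    · exact hw.2 (dvd_trans (pow_dvd_pow 2 (by omega)) hv.1)

theorem powersOf2_eq_iff (x : Int) (hx : x ≠ 0) (v : Nat) :
    powersOf2 x = (v : Int) ↔ ((2:Int) ^ v ∣ x ∧ ¬ (2:Int) ^ (v + 1) ∣ x) := by
  have hs := powersOf2_spec x hx
  have hnn := powersOf2_nonneg x
  constructor
  · intro he
    have : (powersOf2 x).toNat = v := by omega
    rwa [this] at hs
  · intro hv
    have := pow_two_val_unique x (powersOf2 x).toNat v hs hv
    omega

-- findV n 0 is past the largest power of two ≤ n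
theorem findV_gt (n : Int) (v : Nat) : ¬ (2:Int) ^ (findV n v + 1) ≤ n := by
  induction v using findV.induct n with
  | case1 v h ih => rw [findV, if_pos h]; exact ih
  | case2 v h => rw [findV, if_neg h]; exact h

-- proof-side List version of the fill loop, bridged to the Array port below
def fillLoopList (b : List Int) (m : Nat) : List Int → List Int × Nat
  | [] => (b, m)
  | i :: rest => fillLoopList (b.set m (powersOf2 i)) (m + 1) rest

theorem fillLoop_toList : ∀ (l : List Int) (b : Array Int) (m : Nat),
    (fillLoop b m l).1.toList = (fillLoopList b.toList m l).1 := by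
  intro l
  induction l with
  | nil => intro b m; rfl
  | cons i rest ih =>
    intro b m
    show (fillLoop (b.setIfInBounds m (powersOf2 i)) (m+1) rest).1.toList = _
    rw [ih, Array.toList_setIfInBounds]
    rfl

theorem set_append_cons (pre t : List Int) (y x : Int) :
    (pre ++ y :: t).set pre.length x = pre ++ x :: t := by
  induction pre with
  | nil => rfl
  | cons p ps ih => simp [ih]

theorem fillLoop_eq (l : List Int) : ∀ (pre : List Int),
    fillLoopList (pre ++ List.replicate l.length 0) pre.length l
      = (pre ++ l.map powersOf2, pre.length + l.length) := by
  induction l with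
  | nil => intro pre; simp [fillLoopList]
  | cons i rest ih =>
    intro pre
    show fillLoopList ((pre ++ (0:Int) :: List.replicate rest.length 0).set pre.length (powersOf2 i)) (pre.length + 1) rest = _
    rw [set_append_cons]
    have h1 : pre ++ powersOf2 i :: List.replicate rest.length 0
        = (pre ++ [powersOf2 i]) ++ List.replicate rest.length 0 := by simp
    have h2 : pre.length + 1 = (pre ++ [powersOf2 i]).length := by simp
    rw [h1, h2, ih]
    simp [List.length_cons]
    omega

theorem pyRange_evens (n : Int) :
    PySem.List.pyRange 2 (n + 1) 2
      = (List.range (PySem.Int.floordiv n 2).toNat).map (fun (k : Nat) => 2 + 2 * (k : Int)) := by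
  rw [PySem.List.pyRange_of_pos 2 (n+1) (by omega)]
  have harg : (if (2:Int) < n + 1 then ((n + 1 - 2 + 2 - 1) / 2).toNat else 0)
      = (PySem.Int.floordiv n 2).toNat := by
    rw [PySem.Int.floordiv_eq_ediv_of_pos (by omega : (0:Int) < 2)]
    have he : n + 1 - 2 + 2 - 1 = n := by ring
    rw [he]
    split_ifs with h
    · rfl
    · omega
  rw [harg]

def cntB (n : Int) (w : Nat) : Int :=
  PySem.Int.floordiv n (2 ^ w) - PySem.Int.floordiv n (2 ^ (w + 1))

def blocks (n : Int) : Nat → List Int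
  | 0 => []
  | v + 1 => List.replicate (cntB n (v + 1)).toNat ((v + 1 : Nat) : Int) ++ blocks n v

theorem greedyA_stop (n : Int) (l : List Int) (tp sol : Int) (h : n ≤ tp) :
    greedyA n l tp sol = (tp, sol) := by
  cases l with
  | nil => rfl
  | cons x xs => rw [greedyA, if_pos h]

-- greedy over a replicate block, consume-all case
theorem greedyA_repl_all (n w : Int) (hw : 1 ≤ w) : ∀ (c : Nat) (d sol : Int) (rest : List Int),
    0 < d → w * (c : Int) < d →
    greedyA n (List.replicate c w ++ rest) (n - d) sol
      = greedyA n rest (n - (d - w * (c : Int))) (sol + (c : Int)) := by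
  intro c
  induction c with
  | zero => intro d sol rest hd _; simp
  | succ c ih =>
    intro d sol rest hd hlt
    have hc : ((c + 1 : Nat) : Int) = (c : Int) + 1 := by push_cast; ring
    rw [List.replicate_succ, List.cons_append, greedyA,
      if_neg (by omega : ¬ n ≤ n - d)]
    have hd' : 0 < d - w := by nlinarith [hlt, hc]
    have hlt' : w * (c : Int) < d - w := by rw [hc] at hlt; nlinarith
    have : n - d + w = n - (d - w) := by ring
    rw [this, ih (d - w) (sol + 1) rest hd' hlt']
    congr 1
    · rw [hc]; ring
    · rw [hc]; ring

-- greedy over a replicate block, stop-inside case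
theorem greedyA_repl_stop (n w : Int) (hw : 1 ≤ w) : ∀ (c : Nat) (d sol : Int) (rest : List Int),
    0 < d → d ≤ w * (c : Int) →
    greedyA n (List.replicate c w ++ rest) (n - d) sol
      = (n - d + w * PySem.Int.floordiv (d + w - 1) w,
         sol + PySem.Int.floordiv (d + w - 1) w) := by
  intro c
  induction c with
  | zero => intro d sol rest hd hle; exfalso; simp at hle; omega
  | succ c ih =>
    intro d sol rest hd hle
    have hc : ((c + 1 : Nat) : Int) = (c : Int) + 1 := by push_cast; ring
    rw [List.replicate_succ, List.cons_append, greedyA,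
      if_neg (by omega : ¬ n ≤ n - d)]
    by_cases hdw : d - w ≤ 0
    · -- the very next check stops the loop
      have hq : PySem.Int.floordiv (d + w - 1) w = 1 := by
        rw [PySem.Int.floordiv_eq_iff_of_pos (by omega : (0:Int) < w)]
        constructor <;> nlinarith
      rw [greedyA_stop n _ _ _ (by omega : n ≤ n - d + w), hq]
      simp only [Prod.mk.injEq]
      exact ⟨by omega, trivial⟩
    · rw [not_le] at hdw
      have hle' : d - w ≤ w * (c : Int) := by rw [hc] at hle; nlinarith
      have : n - d + w = n - (d - w) := by ring
      rw [this, ih (d - w) (sol + 1) rest (by omega) hle']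
      have hq : PySem.Int.floordiv (d + w - 1) w = PySem.Int.floordiv (d - w + w - 1) w + 1 := by
        rw [PySem.Int.floordiv_eq_ediv_of_pos (by omega : (0:Int) < w),
            PySem.Int.floordiv_eq_ediv_of_pos (by omega : (0:Int) < w)]
        have h1 : d + w - 1 = (d - w + w - 1) + 1 * w := by ring
        rw [h1, Int.add_mul_ediv_right _ _ (by omega : w ≠ 0)]
      rw [hq]
      simp only [Prod.mk.injEq]
      exact ⟨by ring, by ring⟩

theorem floordiv_pow_cast (n : Int) (hn : 0 ≤ n) (w : Nat) :
    PySem.Int.floordiv n (2 ^ w) = ((n.toNat / 2 ^ w : Nat) : Int) := by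
  rw [PySem.Int.floordiv_eq_ediv_of_pos (by positivity : (0:Int) < 2 ^ w)]
  rw [show n = ((n.toNat : Nat) : Int) by omega]
  rw [show ((2:Int) ^ w) = ((2 ^ w : Nat) : Int) by push_cast; ring]
  rw [← Int.natCast_div]
  simp

theorem cntB_nonneg (n : Int) (hn : 0 ≤ n) (w : Nat) : 0 ≤ cntB n w := by
  unfold cntB
  rw [floordiv_pow_cast n hn, floordiv_pow_cast n hn]
  have := Nat.div_le_div_left (Nat.pow_le_pow_right (by omega) (by omega : w ≤ w + 1))
    (by positivity : 0 < 2 ^ w) (a := n.toNat)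
  omega

theorem greedy_blocks (n : Int) (hn : 1 ≤ n) : ∀ (V : Nat) (d sol : Int), 0 < d →
    (let r := greedyA n (blocks n V) (n - d) sol
     if n ≤ r.1 then r.2 else -1) = bucketLoop n V d sol := by
  intro V
  induction V with
  | zero =>
    intro d sol hd
    simp only [blocks, greedyA, bucketLoop]
    rw [if_neg (by omega : ¬ n ≤ n - d)]
  | succ v ih =>
    intro d sol hd
    have hw : (1:Int) ≤ ((v + 1 : Nat) : Int) := by push_cast; omega
    have hcnt : cntB n (v + 1) = PySem.Int.floordiv n (2 ^ (v + 1)) - PySem.Int.floordiv n (2 ^ (v + 2)) := rfl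
    have hcnn : 0 ≤ cntB n (v + 1) := cntB_nonneg n (by omega) (v + 1)
    have hcast : ((cntB n (v + 1)).toNat : Int) = cntB n (v + 1) := by omega
    show (let r := greedyA n (List.replicate (cntB n (v+1)).toNat ((v + 1 : Nat) : Int) ++ blocks n v) (n - d) sol
          if n ≤ r.1 then r.2 else -1) = _
    rw [show bucketLoop n (v+1) d sol =
        (if ((v + 1 : Nat) : Int) * (cntB n (v+1)) < d
         then bucketLoop n v (d - ((v + 1 : Nat) : Int) * cntB n (v+1)) (sol + cntB n (v+1))
         else sol + PySem.Int.floordiv (d + ((v + 1 : Nat) : Int) - 1) ((v + 1 : Nat) : Int)) from rfl]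
    split_ifs with hlt
    · -- consume the whole bucket
      rw [show greedyA n (List.replicate (cntB n (v+1)).toNat ((v + 1 : Nat) : Int) ++ blocks n v) (n - d) sol
          = greedyA n (blocks n v) (n - (d - ((v + 1 : Nat) : Int) * ((cntB n (v+1)).toNat : Int))) (sol + ((cntB n (v+1)).toNat : Int)) from
        greedyA_repl_all n _ hw _ d sol _ hd (by rw [hcast]; exact hlt)]
      rw [hcast]
      exact ih (d - ((v + 1 : Nat) : Int) * cntB n (v+1)) (sol + cntB n (v+1))
        (by nlinarith)
    · -- stop inside the bucket
      have hle : d ≤ ((v + 1 : Nat) : Int) * ((cntB n (v+1)).toNat : Int) := by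
        rw [hcast]; omega
      rw [show greedyA n (List.replicate (cntB n (v+1)).toNat ((v + 1 : Nat) : Int) ++ blocks n v) (n - d) sol
          = (n - d + ((v + 1 : Nat) : Int) * PySem.Int.floordiv (d + ((v + 1 : Nat) : Int) - 1) ((v + 1 : Nat) : Int),
             sol + PySem.Int.floordiv (d + ((v + 1 : Nat) : Int) - 1) ((v + 1 : Nat) : Int)) from
        greedyA_repl_stop n _ hw _ d sol _ hd hle]
      have hq : d ≤ ((v + 1 : Nat) : Int) * PySem.Int.floordiv (d + ((v + 1 : Nat) : Int) - 1) ((v + 1 : Nat) : Int) := by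
        set w : Int := ((v + 1 : Nat) : Int) with hwdef
        have h1 : PySem.Int.floordiv (d + w - 1) w = (d + w - 1) / w :=
          PySem.Int.floordiv_eq_ediv_of_pos (by omega)
        rw [h1]
        have h2 := Int.mul_ediv_add_emod (d + w - 1) w
        have h3 := Int.emod_lt_of_pos (d + w - 1) (by omega : (0:Int) < w)
        have h4 := Int.emod_nonneg (d + w - 1) (by omega : w ≠ 0)
        nlinarith
      rw [if_pos (by omega)]

theorem blocks_mem_le (n : Int) : ∀ (V : Nat) (x : Int), x ∈ blocks n V → x ≤ (V : Int) := by
  intro V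
  induction V with
  | zero => intro x hx; simp [blocks] at hx
  | succ v ih =>
    intro x hx
    rw [blocks, List.mem_append] at hx
    rcases hx with h | h
    · have he := List.eq_of_mem_replicate h; push_cast at he ⊢; omega
    · have := ih x h; push_cast; push_cast at this; omega

theorem blocks_pairwise (n : Int) : ∀ (V : Nat), (blocks n V).Pairwise (fun a b => b ≤ a) := by
  intro V
  induction V with
  | zero => simp [blocks]
  | succ v ih =>
    rw [blocks, List.pairwise_append]
    refine ⟨List.pairwise_replicate.mpr (by omega), ih, ?_⟩
    intro a ha b hb
    rw [List.eq_of_mem_replicate ha]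
    have := blocks_mem_le n v b hb
    push_cast; push_cast at this; omega

theorem blocks_count (n : Int) : ∀ (V : Nat) (x : Int),
    (blocks n V).count x = if 1 ≤ x ∧ x ≤ (V : Int) then (cntB n x.toNat).toNat else 0 := by
  intro V
  induction V with
  | zero => intro x; simp [blocks]; omega
  | succ v ih =>
    intro x
    rw [blocks, List.count_append, List.count_replicate, ih]
    by_cases hx : x = ((v + 1 : Nat) : Int)
    · rw [if_pos (by simp [hx]), if_neg (by push_cast; omega),
        if_pos (by push_cast at hx ⊢; omega)]
      have hxt : x.toNat = v + 1 := by push_cast at hx; omega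
      rw [hxt]
      omega
    · rw [if_neg (by simp only [beq_iff_eq]; intro h; exact absurd h.symm hx)]
      push_cast at hx ⊢
      split_ifs <;> omega

theorem powersOf2_even_step (k : Nat) :
    powersOf2 (2 + 2 * (k : Int)) = powersOf2 ((k : Int) + 1) + 1 := by
  rw [powersOf2, dif_neg (by omega : ¬ (2 + 2*(k:Int) = 0)),
    if_pos (by rw [PySem.Int.mod_eq_zero_iff_dvd]; exact ⟨(k:Int)+1, by ring⟩)]
  congr 2
  rw [PySem.Int.floordiv_eq_ediv_of_pos (by omega : (0:Int) < 2)]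
  omega

theorem countP_range_dvd (d : Nat) (hd : 0 < d) : ∀ (M : Nat),
    (List.range M).countP (fun k => decide (d ∣ (k+1))) = M / d := by
  intro M
  induction M with
  | zero => simp
  | succ M ih =>
    rw [List.range_succ, List.countP_append, ih, Nat.succ_div]
    simp only [List.countP_cons, List.countP_nil]
    by_cases h : d ∣ M + 1
    · simp [h]
    · simp [h]

theorem countP_split (p q : Nat → Bool) (hpq : ∀ k, q k = true → p k = true) :
    ∀ (l : List Nat), l.countP p = l.countP (fun k => p k && !q k) + l.countP q := by
  intro l
  induction l with
  | nil => simp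
  | cons x xs ih =>
    simp only [List.countP_cons, ih]
    by_cases hq : q x
    · have hp := hpq x hq
      simp [hp, hq]; omega
    · by_cases hp : p x <;> simp [hp, hq] <;> omega

-- the list of valuations A materialises
def Ln (n : Int) : List Int :=
  (List.range (PySem.Int.floordiv n 2).toNat).map (fun (k : Nat) => powersOf2 (2 + 2 * (k : Int)))

theorem Ln_count_pos (n : Int) (w : Nat) :
    (Ln n).count (((w + 1 : Nat) : Int))
      = (PySem.Int.floordiv n 2).toNat / 2 ^ w
        - (PySem.Int.floordiv n 2).toNat / 2 ^ (w + 1) := by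
  rw [Ln, List.count_eq_countP, List.countP_map]
  rw [List.countP_congr (q := fun k => decide ((2^w : Nat) ∣ (k+1)) && !decide ((2^(w+1) : Nat) ∣ (k+1)))]
  · rw [show (List.countP (fun k => decide ((2^w : Nat) ∣ (k+1)) && !decide ((2^(w+1) : Nat) ∣ (k+1))) (List.range (PySem.Int.floordiv n 2).toNat)) =
        List.countP (fun k => decide ((2^w : Nat) ∣ (k+1))) (List.range (PySem.Int.floordiv n 2).toNat)
        - List.countP (fun k => decide ((2^(w+1) : Nat) ∣ (k+1))) (List.range (PySem.Int.floordiv n 2).toNat) from by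
      have := countP_split (fun k => decide ((2^w : Nat) ∣ (k+1))) (fun k => decide ((2^(w+1) : Nat) ∣ (k+1)))
        (by intro k hk
            simp only [decide_eq_true_eq] at hk ⊢
            exact dvd_trans (pow_dvd_pow 2 (by omega)) hk)
        (List.range (PySem.Int.floordiv n 2).toNat)
      omega]
    rw [countP_range_dvd _ (by positivity), countP_range_dvd _ (by positivity)]
  · intro k _
    simp only [Function.comp_apply, beq_iff_eq, Bool.and_eq_true, Bool.not_eq_true',
      decide_eq_true_eq, decide_eq_false_iff_not]
    rw [powersOf2_even_step k]
    have h2 := powersOf2_eq_iff ((k : Int) + 1) (by omega) w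
    constructor
    · intro he
      have hpw : powersOf2 ((k:Int)+1) = (w : Int) := by push_cast at he; omega
      obtain ⟨ha, hb⟩ := h2.mp hpw
      constructor
      · rw [← Int.natCast_dvd_natCast]
        push_cast
        convert ha using 2 <;> push_cast <;> ring
      · intro hc
        apply hb
        rw [← Int.natCast_dvd_natCast] at hc
        push_cast at hc
        convert hc using 2 <;> push_cast <;> ring
    · intro ⟨ha, hb⟩
      have hpw : powersOf2 ((k:Int)+1) = (w : Int) := by
        apply h2.mpr
        constructor
        · rw [← Int.natCast_dvd_natCast] at ha
          push_cast at ha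
          convert ha using 2 <;> push_cast <;> ring
        · intro hc
          apply hb
          rw [← Int.natCast_dvd_natCast]
          push_cast
          convert hc using 2 <;> push_cast <;> ring
      push_cast
      omega

theorem Ln_count_nonpos (n : Int) (x : Int) (hx : x ≤ 0) : (Ln n).count x = 0 := by
  rw [List.count_eq_zero]
  intro hmem
  rw [Ln, List.mem_map] at hmem
  obtain ⟨k, _, hk⟩ := hmem
  rw [powersOf2_even_step k] at hk
  have := powersOf2_nonneg ((k : Int) + 1)
  omega

theorem Ln_count_big (n : Int) (hn : 1 ≤ n) (x : Int) (hx : ((findV n 0 : Nat) : Int) < x) :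
    (Ln n).count x = 0 := by
  rw [List.count_eq_zero]
  intro hmem
  rw [Ln, List.mem_map] at hmem
  obtain ⟨k, hkmem, hk⟩ := hmem
  rw [List.mem_range] at hkmem
  have hpos : (0:Int) < 2 + 2 * (k : Int) := by omega
  have hspec := powersOf2_spec (2 + 2 * (k : Int)) (by omega)
  rw [hk] at hspec
  have hdvd : (2:Int) ^ x.toNat ∣ 2 + 2 * (k : Int) := hspec.1
  have hle : (2:Int) ^ x.toNat ≤ 2 + 2 * (k : Int) := Int.le_of_dvd hpos hdvd
  -- 2 + 2k ≤ n
  have hM : ((PySem.Int.floordiv n 2).toNat : Int) = n / 2 := by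
    rw [PySem.Int.floordiv_eq_ediv_of_pos (by omega : (0:Int) < 2)]
    omega
  have hkn : 2 + 2 * (k : Int) ≤ n := by
    have : (k : Int) < ((PySem.Int.floordiv n 2).toNat : Int) := by exact_mod_cast hkmem
    omega
  have hV := findV_gt n 0
  rw [not_le] at hV
  have hxx : findV n 0 + 1 ≤ x.toNat := by
    have h1 := powersOf2_nonneg (2 + 2 * (k : Int))
    omega
  have hmono : (2:Int) ^ (findV n 0 + 1) ≤ (2:Int) ^ x.toNat :=
    pow_le_pow_right₀ (by omega) hxx
  omega

theorem cntB_toNat (n : Int) (hn : 1 ≤ n) (w : Nat) :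
    (cntB n (w + 1)).toNat
      = (PySem.Int.floordiv n 2).toNat / 2 ^ w
        - (PySem.Int.floordiv n 2).toNat / 2 ^ (w + 1) := by
  have h1 : PySem.Int.floordiv n 2 = PySem.Int.floordiv n (2 ^ 1) := by norm_num
  rw [cntB, floordiv_pow_cast n (by omega), floordiv_pow_cast n (by omega), h1,
    floordiv_pow_cast n (by omega)]
  have e1 : (2 ^ 1 : Nat) = 2 := by norm_num
  rw [e1]
  have e2 : n.toNat / 2 / 2 ^ w = n.toNat / 2 ^ (w + 1) := by
    rw [Nat.div_div_eq_div_mul]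
    congr 1
    ring
  have e3 : n.toNat / 2 / 2 ^ (w + 1) = n.toNat / 2 ^ (w + 2) := by
    rw [Nat.div_div_eq_div_mul]
    congr 1
    ring
  have hmono : n.toNat / 2 ^ (w + 2) ≤ n.toNat / 2 ^ (w + 1) :=
    Nat.div_le_div_left (Nat.pow_le_pow_right (by omega) (by omega)) (by positivity)
  simp only [Int.toNat_natCast]
  rw [e2, e3, show w + 1 + 1 = w + 2 from rfl]
  omega

theorem blocks_perm_Ln (n : Int) (hn : 1 ≤ n) : (blocks n (findV n 0)).Perm (Ln n) := by
  rw [List.perm_iff_count]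
  intro x
  rw [blocks_count]
  by_cases hx1 : x ≤ 0
  · rw [if_neg (by omega), Ln_count_nonpos n x hx1]
  · by_cases hx2 : x ≤ ((findV n 0 : Nat) : Int)
    · rw [if_pos (by omega)]
      have hw : x = (((x.toNat - 1) + 1 : Nat) : Int) := by omega
      rw [hw, Ln_count_pos n (x.toNat - 1),
        show ((((x.toNat - 1) + 1 : Nat) : Int)).toNat = (x.toNat - 1) + 1 by omega,
        cntB_toNat n hn (x.toNat - 1)]
    · rw [if_neg (by omega), Ln_count_big n hn x (by omega)]

theorem mergeSort_Ln_eq_blocks (n : Int) (hn : 1 ≤ n) :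
    (Ln n).mergeSort (fun a b : Int => decide (b ≤ a)) = blocks n (findV n 0) := by
  apply List.eq_of_perm_of_sorted (le := fun (a b : Int) => b ≤ a)
    (fun a b _ _ h1 h2 => le_antisymm h2 h1)
  · have hp := List.pairwise_mergeSort (le := fun a b : Int => decide (b ≤ a))
      (by intro a b c h1 h2; simp only [decide_eq_true_eq] at *; omega)
      (by intro a b; simp only [Bool.or_eq_true, decide_eq_true_eq]; omega)
      (Ln n)
    exact hp.imp (by intro a b h; simpa using h)
  · exact blocks_pairwise n (findV n 0)
  · exact ((List.mergeSort_perm (Ln n) _).trans (blocks_perm_Ln n hn).symm)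

theorem foldl_total_nonneg : ∀ (l : List Int) (s : Int), 0 ≤ s →
    0 ≤ l.foldl (fun s j => s + powersOf2 j) s := by
  intro l
  induction l with
  | nil => intro s hs; exact hs
  | cons x xs ih =>
    intro s hs
    apply ih
    show 0 ≤ s + powersOf2 x
    have := powersOf2_nonneg x
    omega

theorem fill_eq_Ln (n : Int) :
    (fillLoop (Array.replicate (PySem.Int.floordiv n 2).toNat 0) 0 (PySem.List.pyRange 2 (n+1) 2)).1.toList = Ln n := by
  rw [fillLoop_toList, Array.toList_replicate]
  have hlen : (PySem.List.pyRange 2 (n+1) 2).length = (PySem.Int.floordiv n 2).toNat := by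
    rw [pyRange_evens, List.length_map, List.length_range]
  have := fillLoop_eq (PySem.List.pyRange 2 (n+1) 2) []
  simp only [List.nil_append, List.length_nil] at this
  rw [← hlen, this]
  rw [pyRange_evens, List.map_map, Ln]
  rfl


theorem make_divisible_eq (n : Int) (a : List Int) :
    make_divisible n a = make_divisible_alt n a := by
  unfold make_divisible make_divisible_alt
  have hfun : (fun (s j : Int) => s + v2 j) = (fun (s j : Int) => s + powersOf2 j) := by
    funext s j; rw [v2_eq_powersOf2]
  rw [hfun]
  dsimp only
  set T := a.foldl (fun s j => s + powersOf2 j) 0 with hT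
  have hT0 : 0 ≤ T := foldl_total_nonneg a 0 le_rfl
  by_cases hd : n - T ≤ 0
  · rw [if_pos hd, greedyA_stop n _ T 0 (by omega), if_pos (by omega)]
  · rw [if_neg hd]
    have hn1 : 1 ≤ n := by omega
    rw [fill_eq_Ln n, mergeSort_Ln_eq_blocks n hn1]
    have hg := greedy_blocks n hn1 (findV n 0) (n - T) 0 (by omega)
    simp only [] at hg
    rw [show n - (n - T) = T by ring] at hg
    exact hg

-- ===== VERDICT (by name: the statement is the Claim_ definition above) =====
theorem make_divisible_spec : Claim_equal_make_divisible := by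
  intro n a _hd
  show make_divisible n a = make_divisible_alt n a
  exact make_divisible_eq n a
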